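-- pv_equiv track=rewrite | github.com/Rav872/A2Z-DSA | Step9.4_Implementation_problems/2.py | stock_spanner
-- ===== SOURCE A (Python) =====
-- def stock_spanner(arr):
--
--     n = len(arr)
--     result = []
--     stack = []
--     for i in range(n): # we need to store index in the stack
--         # Pop element from stack while current element is greater or equal
--         while stack and arr[stack[-1]] <= arr[i]:
--             stack.pop()
--         # If stack is empty, the span is entire range from current day
--         if not stack:
--             span = i + 1
--         else:
--             span = i - stack[-1]
--         result.append(span)
--         stack.append(i)
--     return result
-- ===== SOURCE B (Python) =====
-- def stock_spanner(arr):
--     # Stack-free: jump backwards through previously computed spans.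
--     spans = []
--     for i in range(len(arr)):
--         j = i - 1
--         while j >= 0 and arr[j] <= arr[i]:
--             j -= spans[j]
--         spans.append(i - j)
--     return spans
-- ===== Notes on version B (the rewrite author's own statement) =====
-- stated objective: alternative
-- what changed: B keeps no stack at all: it computes each span by jumping backwards through the already-computed span array (j -= spans[j]) until a strictly greater price, while A maintains a monotonic stack of indices with pop/subtract.
import Mathlib
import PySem

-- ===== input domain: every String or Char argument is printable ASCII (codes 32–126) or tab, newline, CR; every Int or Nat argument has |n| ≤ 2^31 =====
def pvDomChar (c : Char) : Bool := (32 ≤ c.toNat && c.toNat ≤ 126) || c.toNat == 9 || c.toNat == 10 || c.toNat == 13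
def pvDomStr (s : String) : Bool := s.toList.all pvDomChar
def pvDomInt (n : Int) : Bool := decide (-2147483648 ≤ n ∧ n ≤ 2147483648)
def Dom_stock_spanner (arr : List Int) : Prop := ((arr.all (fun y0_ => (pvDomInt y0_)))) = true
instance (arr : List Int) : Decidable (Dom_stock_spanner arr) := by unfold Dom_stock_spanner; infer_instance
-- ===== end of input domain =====

-- B computes each span stack-free, by jumping backwards through the already-computed span
-- array until a strictly greater price, instead of A's monotonic index stack; same O(n) cost.


-- ===== PORT A =====
-- A's stack is kept head-first (head = Python's stack[-1]); indices pushed by the loop are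
-- always in range, so arr[j] is PySem.List.pyGetD arr j 0.
-- the 'while stack and arr[stack[-1]] <= arr[i]: stack.pop()' loop
def pvPopA (arr : List Int) (x : Int) : List Int → List Int
  | [] => []
  | t :: rest => if PySem.List.pyGetD arr t 0 ≤ x then pvPopA arr x rest else t :: rest

-- one iteration of 'for i in range(n)' over state (result, stack)
def pvStepA (arr : List Int) (s : List Int × List Int) (i : Int) : List Int × List Int :=
  let stack := pvPopA arr (PySem.List.pyGetD arr i 0) s.2
  let span := match stack with
    | [] => i + 1
    | t :: _ => i - t
  (s.1 ++ [span], i :: stack)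

def stock_spanner (arr : List Int) : List Int :=
  ((PySem.List.pyRange 0 (arr.length : Int) 1).foldl (pvStepA arr) ([], [])).1

-- ===== PORT B =====
-- the 'while j >= 0 and arr[j] <= price: j -= spans[j]' loop; the extra Nat argument is a
-- fuel guard for totality only (each jump lands on a smaller chain, spans.length + 1 suffices);
-- spans[j] on the visited j is always in range, so it is PySem.List.pyGetD spans j 0.
def pvJump (arr spans : List Int) (price : Int) : Nat → Int → Int
  | 0, j => j
  | fuel + 1, j =>
      if 0 ≤ j ∧ PySem.List.pyGetD arr j 0 ≤ price then
        pvJump arr spans price fuel (j - PySem.List.pyGetD spans j 0)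
      else j

-- one iteration of 'for i in range(len(arr))' over the spans list
def pvStepB (arr : List Int) (spans : List Int) (i : Int) : List Int :=
  let j := pvJump arr spans (PySem.List.pyGetD arr i 0) (spans.length + 1) (i - 1)
  spans ++ [i - j]

def stock_spanner_alt (arr : List Int) : List Int :=
  (PySem.List.pyRange 0 (arr.length : Int) 1).foldl (pvStepB arr) []

-- ===== PRECONDITION & SPEC =====
def Spec_stock_spanner (arr : List Int) (out : List Int) : Prop := out = stock_spanner_alt arr
instance (arr : List Int) (out : List Int) : Decidable (Spec_stock_spanner arr out) := by unfold Spec_stock_spanner; infer_instance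

-- ===== CLAIM (what is proved, stated in full; the proofs are below) =====
def Claim_equal_stock_spanner : Prop := ∀ (arr : List Int), Dom_stock_spanner arr → Spec_stock_spanner arr (stock_spanner arr)

-- ===== LEMMAS AND PROOFS =====

-- invariant tying A's index stack to B's span array: each stack entry t is a nonnegative
-- index with spans[t] = t - (next entry below, or -1), i.e. following 'j -= spans[j]' from
-- the stack top walks down A's stack exactly.
def pvChain (spans : List Int) : List Int → Prop
  | [] => True
  | t :: rest => 0 ≤ t ∧ PySem.List.pyGetD spans t 0 = t - rest.headD (-1) ∧ pvChain spans rest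

theorem pvChain_pop (arr spans : List Int) (p : Int) :
    ∀ sA, pvChain spans sA → pvChain spans (pvPopA arr p sA) := by
  intro sA
  induction sA with
  | nil => intro h; exact h
  | cons t rest ih =>
      intro h
      unfold pvPopA
      split_ifs with hc
      · exact ih h.2.2
      · exact h

theorem pvPopA_subset (arr : List Int) (p : Int) :
    ∀ sA t, t ∈ pvPopA arr p sA → t ∈ sA := by
  intro sA
  induction sA with
  | nil => intro t h; exact h
  | cons u rest ih =>
      intro t h
      unfold pvPopA at h
      split_ifs at h with hc
      · exact List.mem_cons_of_mem _ (ih t h)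
      · exact h

theorem pvPopA_length (arr : List Int) (p : Int) :
    ∀ sA, (pvPopA arr p sA).length ≤ sA.length := by
  intro sA
  induction sA with
  | nil => simp [pvPopA]
  | cons u rest ih =>
      unfold pvPopA
      split_ifs with hc
      · exact le_trans ih (by simp)
      · simp

theorem pvGetD_append_lt (spans : List Int) (x t : Int)
    (h0 : 0 ≤ t) (hlt : t < (spans.length : Int)) :
    PySem.List.pyGetD (spans ++ [x]) t 0 = PySem.List.pyGetD spans t 0 := by
  obtain ⟨k, rfl⟩ := Int.eq_ofNat_of_zero_le h0
  have hk : k < spans.length := by exact_mod_cast hlt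
  rw [PySem.List.pyGetD_natCast, PySem.List.pyGetD_natCast,
      List.getD_eq_getElem _ _ (by simp; omega), List.getD_eq_getElem _ _ hk]
  simp [hk]

theorem pvGetD_append_self (spans : List Int) (x : Int) :
    PySem.List.pyGetD (spans ++ [x]) (spans.length : Int) 0 = x := by
  rw [PySem.List.pyGetD_natCast, List.getD_eq_getElem _ _ (by simp)]
  simp

theorem pvChain_append (spans : List Int) (x : Int) :
    ∀ sA, (∀ t ∈ sA, 0 ≤ t ∧ t < (spans.length : Int)) → pvChain spans sA →
      pvChain (spans ++ [x]) sA := by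
  intro sA
  induction sA with
  | nil => intro _ h; exact h
  | cons t rest ih =>
      intro hb h
      obtain ⟨h0, hget, hrest⟩ := h
      obtain ⟨_, hlt⟩ := hb t (List.mem_cons_self ..)
      exact ⟨h0, by rw [pvGetD_append_lt spans x t h0 hlt]; exact hget,
        ih (fun u hu => hb u (List.mem_cons_of_mem _ hu)) hrest⟩

-- B's jump from the stack top lands exactly on the head of A's popped stack (-1 if empty)
theorem pvJump_eq (arr spans p : _) :
    ∀ (sA : List Int) (fuel : Nat), pvChain spans sA → sA.length + 1 ≤ fuel →
      pvJump arr spans p fuel (sA.headD (-1)) = (pvPopA arr p sA).headD (-1) := by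
  intro sA
  induction sA with
  | nil =>
      intro fuel _ hf
      obtain ⟨f, rfl⟩ : ∃ f, fuel = f + 1 := ⟨fuel - 1, by omega⟩
      simp [pvJump, pvPopA]
  | cons t rest ih =>
      intro fuel hc hf
      obtain ⟨f, rfl⟩ : ∃ f, fuel = f + 1 := ⟨fuel - 1, by omega⟩
      obtain ⟨h0, hget, hrest⟩ := hc
      unfold pvJump pvPopA
      simp only [List.headD_cons]
      by_cases harr : PySem.List.pyGetD arr t 0 ≤ p
      · rw [if_pos ⟨h0, harr⟩, if_pos harr, hget]
        have : t - (t - rest.headD (-1)) = rest.headD (-1) := by ring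
        rw [this]
        exact ih f hrest (by simp at hf ⊢; omega)
      · rw [if_neg (by tauto), if_neg harr]
        simp

-- A's span expression equals i - (popped stack's head, -1 if empty)
theorem pvSpan_eq (i : Int) (stack : List Int) :
    (match stack with | [] => i + 1 | t :: _ => i - t) = i - stack.headD (-1) := by
  cases stack with
  | nil => simp
  | cons t ts => simp

-- main loop invariant
theorem pvMain (arr : List Int) :
    ∀ (k : Nat) (i : Nat) (res sA : List Int),
      arr.length = i + k →
      res.length = i →
      sA.headD (-1) = (i : Int) - 1 →
      pvChain res sA →
      sA.length ≤ i →
      (∀ t ∈ sA, 0 ≤ t ∧ t < (i : Int)) →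
      ((PySem.List.pyRange (i : Int) (arr.length : Int) 1).foldl (pvStepA arr) (res, sA)).1
        = (PySem.List.pyRange (i : Int) (arr.length : Int) 1).foldl (pvStepB arr) res := by
  intro k
  induction k with
  | zero =>
      intro i res sA hlen _ _ _ _ _
      rw [PySem.List.pyRange_one_eq_nil (by omega)]
      simp
  | succ k ih =>
      intro i res sA hlen hres hhead hchain hslen hbound
      have hi : (i : Int) < (arr.length : Int) := by exact_mod_cast by omega
      rw [PySem.List.pyRange_one_cons hi]
      simp only [List.foldl_cons]
      set p := PySem.List.pyGetD arr (i : Int) 0 with hp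
      set popped := pvPopA arr p sA with hpop
      have hjump : pvJump arr res p (res.length + 1) ((i : Int) - 1)
          = popped.headD (-1) := by
        rw [← hhead]
        exact pvJump_eq arr res p sA (res.length + 1) hchain (by omega)
      have hstepA : pvStepA arr (res, sA) (i : Int)
          = (res ++ [(i : Int) - popped.headD (-1)], (i : Int) :: popped) := by
        simp only [pvStepA, ← hp, ← hpop, pvSpan_eq]
      have hstepB : pvStepB arr res (i : Int)
          = res ++ [(i : Int) - popped.headD (-1)] := by
        simp only [pvStepB, ← hp, hjump]
      rw [hstepA, hstepB]
      -- re-establish the invariant for i+1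
      have hbound' : ∀ t ∈ (i : Int) :: popped, 0 ≤ t ∧ t < ((i + 1 : Nat) : Int) := by
        intro t ht
        rcases List.mem_cons.mp ht with rfl | ht
        · exact ⟨by positivity, by push_cast; omega⟩
        · obtain ⟨h0, hlt⟩ := hbound t (pvPopA_subset arr p sA t ht)
          exact ⟨h0, by push_cast; omega⟩
      have hchain' : pvChain (res ++ [(i : Int) - popped.headD (-1)]) ((i : Int) :: popped) := by
        refine ⟨by positivity, ?_, ?_⟩
        · rw [← hres] at *
          rw [pvGetD_append_self]
        · exact pvChain_append res _ popped
            (fun t ht => by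
              obtain ⟨h0, hlt⟩ := hbound t (pvPopA_subset arr p sA t ht)
              exact ⟨h0, by omega⟩)
            (pvChain_pop arr res p sA hchain)
      have := ih (i + 1) (res ++ [(i : Int) - popped.headD (-1)]) ((i : Int) :: popped)
        (by omega) (by simp [hres]) (by push_cast; simp) hchain'
        (by
          have h1 : popped.length ≤ sA.length := by rw [hpop]; exact pvPopA_length arr p sA
          simp only [List.length_cons]; omega) hbound'
      simpa using this

-- ===== VERDICT (by name: the statement is the Claim_ definition above) =====
theorem stock_spanner_spec : Claim_equal_stock_spanner := by
  intro arr _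
  unfold Spec_stock_spanner stock_spanner stock_spanner_alt
  have := pvMain arr arr.length 0 [] [] (by omega) rfl (by simp) trivial (by simp) (by simp)
  simpa using this
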